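-- pv_equiv track=rewrite | github.com/awaddell77/Scrapers | alpha_sort.py | alpha_sum
-- ===== SOURCE A (Python) =====
-- def alpha_sum(x):
-- 	sum_of_str = 0
-- 	for i in x:
-- 		n = ord(i)
-- 		if ord(i) < 97 and 91 > ord(i) > 64:
-- 			n = ord(i) + 32
-- 		sum_of_str += n
-- 	return sum_of_str
-- ===== SOURCE B (Python) =====
-- def alpha_sum(x):
--     return sum(map(ord, x)) + 32 * sum(1 for c in x if 'A' <= c <= 'Z')
-- ===== Notes on version B (the rewrite author's own statement) =====
-- stated objective: idiomatic
-- what changed: Replaces the single loop with a mutable accumulator and an in-loop branch by two independent aggregations: a plain sum of code points plus a 32-per-uppercase correction combined at the end.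
import Mathlib
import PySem

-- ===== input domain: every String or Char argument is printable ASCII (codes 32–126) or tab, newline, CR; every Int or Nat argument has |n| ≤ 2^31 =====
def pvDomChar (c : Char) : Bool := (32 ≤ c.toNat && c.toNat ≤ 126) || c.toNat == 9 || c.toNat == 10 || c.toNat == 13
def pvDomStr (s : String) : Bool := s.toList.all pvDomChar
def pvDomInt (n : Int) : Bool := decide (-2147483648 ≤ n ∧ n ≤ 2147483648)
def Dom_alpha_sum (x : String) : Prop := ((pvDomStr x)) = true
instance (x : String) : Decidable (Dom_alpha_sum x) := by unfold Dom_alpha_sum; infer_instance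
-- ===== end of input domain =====

-- B recomputes the same total as a plain code-point sum plus a 32-per-uppercase-letter
-- correction (two independent aggregations) instead of one loop with an in-loop branch; idiomatic, same cost.

-- ===== PORT A =====
-- Port of A: one fold over the characters, branch inside the loop.
def alpha_sum (x : String) : Int :=
  x.toList.foldl (fun sum_of_str i =>
    let n : Int := i.toNat
    let n := if i.toNat < 97 ∧ (i.toNat < 91 ∧ 64 < i.toNat) then (i.toNat : Int) + 32 else n
    sum_of_str + n) 0

-- ===== PORT B =====
-- Port of B: plain code-point sum plus 32 per uppercase ASCII letter.
def alpha_sum_alt (x : String) : Int :=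
  (x.toList.map (fun c => (c.toNat : Int))).sum
    + 32 * ((x.toList.filter (fun c => 'A' ≤ c ∧ c ≤ 'Z')).length : Int)

-- ===== PRECONDITION & SPEC =====
def Spec_alpha_sum (x : String) (out : Int) : Prop := out = alpha_sum_alt x
instance (x : String) (out : Int) : Decidable (Spec_alpha_sum x out) := by unfold Spec_alpha_sum; infer_instance

-- ===== CLAIM (what is proved, stated in full; the proofs are below) =====
def Claim_equal_alpha_sum : Prop := ∀ (x : String), Dom_alpha_sum x → Spec_alpha_sum x (alpha_sum x)

-- ===== LEMMAS AND PROOFS =====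

-- ===== VERDICT (by name: the statement is the Claim_ definition above) =====
theorem alpha_sum_key (l : List Char) (acc : Int) :
    l.foldl (fun sum_of_str i =>
      let n : Int := i.toNat
      let n := if i.toNat < 97 ∧ (i.toNat < 91 ∧ 64 < i.toNat) then (i.toNat : Int) + 32 else n
      sum_of_str + n) acc
    = acc + (l.map (fun c => (c.toNat : Int))).sum
        + 32 * ((l.filter (fun c => 'A' ≤ c ∧ c ≤ 'Z')).length : Int) := by
  induction l generalizing acc with
  | nil => simp
  | cons c t ih =>
    simp only [List.foldl_cons, List.map_cons, List.sum_cons, List.filter_cons, ih]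
    have hle : ('A' ≤ c ∧ c ≤ 'Z') ↔ (64 < c.toNat ∧ c.toNat < 91) := by
      constructor
      · rintro ⟨h1, h2⟩
        exact ⟨Nat.lt_of_lt_of_le (by decide) h1, Nat.lt_of_le_of_lt h2 (by decide)⟩
      · rintro ⟨h1, h2⟩
        exact ⟨Char.le_def.mpr h1, Char.le_def.mpr (Nat.lt_succ_iff.mp h2)⟩
    by_cases h : 64 < c.toNat ∧ c.toNat < 91
    · have hA : c.toNat < 97 ∧ (c.toNat < 91 ∧ 64 < c.toNat) := ⟨by omega, h.2, h.1⟩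
      simp only [if_pos hA, if_pos (decide_eq_true (hle.mpr h)), List.length_cons]
      push_cast
      ring
    · have hA : ¬ (c.toNat < 97 ∧ (c.toNat < 91 ∧ 64 < c.toNat)) := by
        intro ⟨_, h2, h3⟩; exact h ⟨h3, h2⟩
      have hB : ¬ (decide ('A' ≤ c ∧ c ≤ 'Z') = true) := by
        simp only [decide_eq_true_eq, hle]; exact h
      simp only [if_neg hA, if_neg hB]
      ring

theorem alpha_sum_spec : Claim_equal_alpha_sum := by
  intro x _
  unfold Spec_alpha_sum alpha_sum alpha_sum_alt
  rw [alpha_sum_key]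
  ring
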